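-- pv_equiv track=rewrite | github.com/underfitting-lu/contractskill | run_vwa_experiment.py | order_classifieds_pagination_targets
-- ===== SOURCE A (Python) =====
-- CLASSIFIEDS_PAGINATION_PREV_TOKENS = {"<", "<<", "prev", "previous"}
--
-- CLASSIFIEDS_PAGINATION_NEXT_TOKENS = {">", ">>", "next"}
--
-- def order_classifieds_pagination_targets(targets: list[str]) -> list[str]:
--     deduped: list[str] = []
--     seen: set[str] = set()
--     for raw_target in targets:
--         target = str(raw_target or "").strip()
--         if not target or target in seen:
--             continue
--         seen.add(target)
--         deduped.append(target)
--
--     def sort_key(target: str) -> tuple[int, int, str]: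
--         lowered = target.lower()
--         if lowered in CLASSIFIEDS_PAGINATION_PREV_TOKENS:
--             return (3, 0, lowered)
--         if target.isdigit():
--             return (0, int(target), lowered)
--         if lowered in CLASSIFIEDS_PAGINATION_NEXT_TOKENS:
--             return (1, 0, lowered)
--         if len(target) <= 2 and not any(ch.isalnum() for ch in target):
--             return (1, 1, lowered)
--         return (2, 0, lowered)
--
--     return [target for target in sorted(deduped, key=sort_key) if target.lower() not in CLASSIFIEDS_PAGINATION_PREV_TOKENS]
-- ===== SOURCE B (Python) =====
-- CLASSIFIEDS_PAGINATION_PREV_TOKENS = {"<", "<<", "prev", "previous"}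
--
-- CLASSIFIEDS_PAGINATION_NEXT_TOKENS = {">", ">>", "next"}
--
-- def order_classifieds_pagination_targets(targets: list[str]) -> list[str]:
--     # One pass: dedup stripped targets and drop prev-tokens before sorting,
--     # then stable-sort each ordered bucket separately instead of one composite-key sort.
--     seen: set[str] = set()
--     survivors: list[str] = []
--     for raw_target in targets:
--         target = str(raw_target or "").strip()
--         if not target or target in seen:
--             continue
--         seen.add(target)
--         if target.lower() not in CLASSIFIEDS_PAGINATION_PREV_TOKENS:
--             survivors.append(target)
--
--     def category(target: str) -> int:
--         if target.isdigit():
--             return 0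
--         if target.lower() in CLASSIFIEDS_PAGINATION_NEXT_TOKENS:
--             return 1
--         if len(target) <= 2 and not any(ch.isalnum() for ch in target):
--             return 2
--         return 3
--
--     digits = [t for t in survivors if category(t) == 0]
--     nexts = [t for t in survivors if category(t) == 1]
--     symbols = [t for t in survivors if category(t) == 2]
--     others = [t for t in survivors if category(t) == 3]
--     digits.sort(key=lambda t: (int(t), t.lower()))
--     nexts.sort(key=str.lower)
--     symbols.sort(key=str.lower)
--     others.sort(key=str.lower)
--     return digits + nexts + symbols + others
-- ===== Notes on version B (the rewrite author's own statement) =====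
-- stated objective: alternative
-- what changed: Instead of one sorted() over a composite (category, int, lowered) key followed by a prev-token filter, B drops prev-tokens during the dedup pass, partitions the survivors into the four ordered categories (digits, next-tokens, short symbols, other) and stably sorts each bucket on its own key, concatenating the buckets.
import Mathlib
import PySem

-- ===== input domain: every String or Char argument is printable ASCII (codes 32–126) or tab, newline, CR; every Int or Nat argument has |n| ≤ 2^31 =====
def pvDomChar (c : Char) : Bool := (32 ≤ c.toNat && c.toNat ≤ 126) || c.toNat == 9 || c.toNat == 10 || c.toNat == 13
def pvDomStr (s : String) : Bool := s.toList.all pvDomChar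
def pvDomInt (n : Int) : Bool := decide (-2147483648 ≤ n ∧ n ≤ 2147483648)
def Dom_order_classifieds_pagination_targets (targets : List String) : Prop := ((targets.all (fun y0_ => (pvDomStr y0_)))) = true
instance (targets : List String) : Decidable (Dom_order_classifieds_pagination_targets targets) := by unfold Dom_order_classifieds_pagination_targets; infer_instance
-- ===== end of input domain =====

-- B replaces A's single composite-key sort with dedup-and-drop-prev followed by four
-- category buckets, each stably sorted on its own key and concatenated (objective: alternative).

-- ===== PORT A =====
-- module constants (Python sets used only for membership tests)
def pvPrevTokens : List String := ["<", "<<", "prev", "previous"]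
def pvNextTokens : List String := [">", ">>", "next"]
-- int(target); exact where A calls it: target passed target.isdigit(), so int() succeeds
def pvDigitVal (t : String) : Int := (PySem.Int.ofStr? t).getD 0

def pvSortKey (t : String) : Int × Int × String :=
  let lowered := PySem.Str.lower t
  if pvPrevTokens.contains lowered then (3, 0, lowered)
  else if PySem.Str.strIsdigit t then (0, pvDigitVal t, lowered)
  else if pvNextTokens.contains lowered then (1, 0, lowered)
  else if PySem.Str.len t ≤ 2 && !(t.toList.any PySem.Chars.isalnum) then (1, 1, lowered)
  else (2, 0, lowered)

-- Python's lexicographic '<' on the (int, int, str) key tuples, written out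
def pvTupLt (a b : Int × Int × String) : Bool :=
  decide (a.1 < b.1) || (a.1 == b.1 && (decide (a.2.1 < b.2.1) || (a.2.1 == b.2.1 && decide (a.2.2 < b.2.2))))

-- A's dedup loop: state = (seen, deduped)
def pvDedupA (targets : List String) : PySem.Set String × List String :=
  targets.foldl (fun st raw =>
    let target := PySem.Str.strip (if raw == "" then "" else raw)   -- str(raw or "").strip()
    if target == "" || PySem.Set.contains st.1 target then st
    else (PySem.Set.add st.1 target, st.2 ++ [target]))
  (PySem.Set.empty, [])

-- sorted(deduped, key=sort_key): PySem.List.sorted IS this stable insertBy fold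
-- (sorted_eq_foldl_insertBy); the tuple key has no Lean lex '<' instance, so the
-- tuple comparison is spelled out as pvTupLt — exactly Python's tuple '<'.
def order_classifieds_pagination_targets (targets : List String) : List String :=
  (((pvDedupA targets).2.foldl
      (fun acc x => PySem.List.insertBy (fun a b => pvTupLt (pvSortKey a) (pvSortKey b)) x acc) []).filter
    (fun t => !(pvPrevTokens.contains (PySem.Str.lower t))))

-- ===== PORT B =====
-- B's dedup loop, dropping prev-tokens as it goes: state = (seen, survivors)
def pvSurvivors (targets : List String) : PySem.Set String × List String :=
  targets.foldl (fun st raw =>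
    let target := PySem.Str.strip (if raw == "" then "" else raw)
    if target == "" || PySem.Set.contains st.1 target then st
    else (PySem.Set.add st.1 target,
      if pvPrevTokens.contains (PySem.Str.lower target) then st.2 else st.2 ++ [target]))
  (PySem.Set.empty, [])

def pvCategory (t : String) : Int :=
  if PySem.Str.strIsdigit t then 0
  else if pvNextTokens.contains (PySem.Str.lower t) then 1
  else if PySem.Str.len t ≤ 2 && !(t.toList.any PySem.Chars.isalnum) then 2
  else 3

def order_classifieds_pagination_targets_alt (targets : List String) : List String :=
  PySem.List.sorted2 ((pvSurvivors targets).2.filter (fun t => pvCategory t == 0)) pvDigitVal (fun t => PySem.Str.lower t) ++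
  PySem.List.sorted ((pvSurvivors targets).2.filter (fun t => pvCategory t == 1)) (fun t => PySem.Str.lower t) ++
  PySem.List.sorted ((pvSurvivors targets).2.filter (fun t => pvCategory t == 2)) (fun t => PySem.Str.lower t) ++
  PySem.List.sorted ((pvSurvivors targets).2.filter (fun t => pvCategory t == 3)) (fun t => PySem.Str.lower t)

-- ===== PRECONDITION & SPEC =====
def Spec_order_classifieds_pagination_targets (targets : List String) (out : List String) : Prop := out = order_classifieds_pagination_targets_alt targets
instance (targets : List String) (out : List String) : Decidable (Spec_order_classifieds_pagination_targets targets out) := by unfold Spec_order_classifieds_pagination_targets; infer_instance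

-- ===== CLAIM (what is proved, stated in full; the proofs are below) =====
def Claim_equal_order_classifieds_pagination_targets : Prop := ∀ (targets : List String), Dom_order_classifieds_pagination_targets targets → Spec_order_classifieds_pagination_targets targets (order_classifieds_pagination_targets targets)

-- ===== LEMMAS AND PROOFS =====

-- the five sort-key classes in key order: 0 digit, 1 next, 2 symbol, 3 other, 4 prev
def pvCat5 (t : String) : Int :=
  if pvPrevTokens.contains (PySem.Str.lower t) then 4 else pvCategory t

lemma pvCat5_cases (t : String) :
    pvCat5 t = 0 ∨ pvCat5 t = 1 ∨ pvCat5 t = 2 ∨ pvCat5 t = 3 ∨ pvCat5 t = 4 := by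
  simp only [pvCat5, pvCategory]; split_ifs <;> simp

lemma pvCmpA_false_of_gt (x y : String) (h : pvCat5 y < pvCat5 x) :
    pvTupLt (pvSortKey x) (pvSortKey y) = false := by
  simp only [pvCat5, pvCategory, pvSortKey, pvTupLt] at *
  split_ifs at * <;> simp_all

lemma pvCmpA_true_of_lt (x y : String) (h : pvCat5 x < pvCat5 y) :
    pvTupLt (pvSortKey x) (pvSortKey y) = true := by
  simp only [pvCat5, pvCategory, pvSortKey, pvTupLt] at *
  split_ifs at * <;> simp_all

lemma pvCmpA_digit (x y : String) (hx : pvCat5 x = 0) (hy : pvCat5 y = 0) :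
    pvTupLt (pvSortKey x) (pvSortKey y)
      = (decide (pvDigitVal x < pvDigitVal y) ||
         (!decide (pvDigitVal y < pvDigitVal x) && decide (PySem.Str.lower x < PySem.Str.lower y))) := by
  simp only [pvCat5, pvCategory, pvSortKey, pvTupLt] at *
  split_ifs at * <;> simp_all
  rcases lt_trichotomy (pvDigitVal x) (pvDigitVal y) with h | h | h
  · simp [h]
  · simp [h]
  · have h1 : ¬ pvDigitVal x < pvDigitVal y := by omega
    have h2 : (pvDigitVal x == pvDigitVal y) = false := by simp; omega
    simp [h1, h2, h]

lemma pvCmpA_low (x y : String) (hxy : pvCat5 x = pvCat5 y) (h0 : pvCat5 x ≠ 0) :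
    pvTupLt (pvSortKey x) (pvSortKey y) = decide (PySem.Str.lower x < PySem.Str.lower y) := by
  simp only [pvCat5, pvCategory, pvSortKey, pvTupLt] at *
  split_ifs at * <;> simp_all

lemma insertBy_append_all_false {α : Type} (before : α → α → Bool) (x : α) (l r : List α)
    (h : ∀ y ∈ l, before x y = false) :
    PySem.List.insertBy before x (l ++ r) = l ++ PySem.List.insertBy before x r := by
  induction l with
  | nil => rfl
  | cons hd tl ih =>
      have hhd := h hd (by simp)
      simp [PySem.List.insertBy, hhd, ih (fun y hy => h y (by simp [hy]))]

lemma insertBy_append_all_true {α : Type} (before : α → α → Bool) (x : α) (l r : List α)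
    (h : ∀ y ∈ r, before x y = true) :
    PySem.List.insertBy before x (l ++ r) = PySem.List.insertBy before x l ++ r := by
  induction l with
  | nil =>
      cases r with
      | nil => rfl
      | cons hd tl => simp [PySem.List.insertBy, h hd (by simp)]
  | cons hd tl ih =>
      by_cases hb : before x hd = true
      · simp [PySem.List.insertBy, hb]
      · simp only [Bool.not_eq_true] at hb
        simp [PySem.List.insertBy, hb, ih]

lemma insertBy_congr {α : Type} (before before' : α → α → Bool) (x : α) (l : List α)
    (h : ∀ y ∈ l, before x y = before' x y) :
    PySem.List.insertBy before x l = PySem.List.insertBy before' x l := by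
  induction l with
  | nil => rfl
  | cons hd tl ih =>
      have hhd := h hd (by simp)
      simp only [PySem.List.insertBy, hhd]
      split_ifs <;> simp [ih (fun y hy => h y (by simp [hy]))]

lemma sorted_snoc {α κ : Type} [LT κ] [DecidableLT κ] (l : List α) (x : α) (key : α → κ) :
    PySem.List.sorted (l ++ [x]) key
      = PySem.List.insertBy (fun a b => decide (key a < key b)) x (PySem.List.sorted l key) := by
  rw [PySem.List.sorted_eq_foldl_insertBy, PySem.List.sorted_eq_foldl_insertBy, List.foldl_append]
  rfl

lemma sorted2_snoc {α κ₁ κ₂ : Type} [LT κ₁] [DecidableLT κ₁] [LT κ₂] [DecidableLT κ₂]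
    (l : List α) (x : α) (k1 : α → κ₁) (k2 : α → κ₂) :
    PySem.List.sorted2 (l ++ [x]) k1 k2
      = PySem.List.insertBy
          (fun a b => decide (k1 a < k1 b) || (!decide (k1 b < k1 a) && decide (k2 a < k2 b)))
          x (PySem.List.sorted2 l k1 k2) := by
  simp only [PySem.List.sorted2, List.foldl_append, List.foldl, Bool.false_eq_true, if_false]

-- bucket i of a list, and its sorted form (bucket 0 by (int, lower), others by lower)
def pvBucket (i : Int) (d : List String) : List String := d.filter (fun t => pvCat5 t == i)

def pvSortedBucket (i : Int) (d : List String) : List String :=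
  if i == 0 then PySem.List.sorted2 (pvBucket 0 d) pvDigitVal (fun t => PySem.Str.lower t)
  else PySem.List.sorted (pvBucket i d) (fun t => PySem.Str.lower t)

lemma mem_pvSortedBucket {y : String} {i : Int} {d : List String}
    (h : y ∈ pvSortedBucket i d) : pvCat5 y = i := by
  simp only [pvSortedBucket] at h
  split_ifs at h with hi
  · have hmem : y ∈ pvBucket 0 d :=
      (PySem.List.sorted2_perm _ _ _ _).mem_iff.mp h
    have := (List.mem_filter.mp hmem).2
    simp only [beq_iff_eq] at hi this
    omega
  · have hmem : y ∈ pvBucket i d := (PySem.List.mem_sorted _ _ _ _).mp h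
    have := (List.mem_filter.mp hmem).2
    simpa using this

-- the comparator used inside bucket i (bucket 0: (int, lower); others: lower)
def pvBucketLt (i : Int) : String → String → Bool :=
  if i == 0 then
    fun a b => decide (pvDigitVal a < pvDigitVal b) ||
      (!decide (pvDigitVal b < pvDigitVal a) && decide (PySem.Str.lower a < PySem.Str.lower b))
  else fun a b => decide (PySem.Str.lower a < PySem.Str.lower b)

lemma pvCmpA_bucket (x y : String) (h : pvCat5 x = pvCat5 y) :
    pvTupLt (pvSortKey x) (pvSortKey y) = pvBucketLt (pvCat5 x) x y := by
  by_cases h0 : pvCat5 x = 0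
  · rw [pvCmpA_digit x y h0 (h ▸ h0), h0]; rfl
  · rw [pvCmpA_low x y h h0]
    have hif : (pvCat5 x == (0 : Int)) = false := by simpa using h0
    simp only [pvBucketLt, hif, Bool.false_eq_true, if_false]

lemma pvBucket_snoc (i : Int) (d : List String) (x : String) :
    pvBucket i (d ++ [x]) = pvBucket i d ++ (if pvCat5 x == i then [x] else []) := by
  by_cases h : pvCat5 x = i
  · simp [pvBucket, List.filter_append, h]
  · have hb : (pvCat5 x == i) = false := by simpa using h
    simp [pvBucket, List.filter_append, hb]

lemma pvSortedBucket_snoc_eq (i : Int) (d : List String) (x : String) (h : pvCat5 x = i) :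
    pvSortedBucket i (d ++ [x]) = PySem.List.insertBy (pvBucketLt i) x (pvSortedBucket i d) := by
  have hb : pvBucket i (d ++ [x]) = pvBucket i d ++ [x] := by
    rw [pvBucket_snoc]; simp [h]
  by_cases hi : i = 0
  · subst hi
    simp only [pvSortedBucket, pvBucketLt, if_pos (by simp : (((0 : Int)) == 0) = true)]
    rw [hb]
    exact sorted2_snoc _ _ _ _
  · have hif : (i == (0 : Int)) = false := by simpa using hi
    simp only [pvSortedBucket, pvBucketLt, hif, Bool.false_eq_true, if_false]
    rw [hb]
    exact sorted_snoc _ _ _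

lemma pvSortedBucket_snoc_ne (i : Int) (d : List String) (x : String) (h : pvCat5 x ≠ i) :
    pvSortedBucket i (d ++ [x]) = pvSortedBucket i d := by
  have hb : pvBucket i (d ++ [x]) = pvBucket i d := by
    rw [pvBucket_snoc]; simp [h]
  by_cases hi : i = 0
  · subst hi; simp only [pvSortedBucket, hb]
  · have hif : (i == (0 : Int)) = false := by simpa using hi
    simp only [pvSortedBucket, hif, Bool.false_eq_true, if_false, hb]

lemma cmp_false_bucket (x : String) (j : Int) (d : List String) (hj : j < pvCat5 x) :
    ∀ y ∈ pvSortedBucket j d, pvTupLt (pvSortKey x) (pvSortKey y) = false := by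
  intro y hy
  exact pvCmpA_false_of_gt x y (by rw [mem_pvSortedBucket hy]; exact hj)

lemma cmp_true_bucket (x : String) (j : Int) (d : List String) (hj : pvCat5 x < j) :
    ∀ y ∈ pvSortedBucket j d, pvTupLt (pvSortKey x) (pvSortKey y) = true := by
  intro y hy
  exact pvCmpA_true_of_lt x y (by rw [mem_pvSortedBucket hy]; exact hj)

lemma insertBy_bucket (x : String) (i : Int) (d : List String) (h : pvCat5 x = i) :
    PySem.List.insertBy (fun a b => pvTupLt (pvSortKey a) (pvSortKey b)) x (pvSortedBucket i d)
      = PySem.List.insertBy (pvBucketLt i) x (pvSortedBucket i d) := by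
  apply insertBy_congr
  intro y hy
  rw [pvCmpA_bucket x y (by rw [h, mem_pvSortedBucket hy]), h]

lemma split_sort (d : List String) :
    d.foldl (fun acc x => PySem.List.insertBy (fun a b => pvTupLt (pvSortKey a) (pvSortKey b)) x acc) []
      = pvSortedBucket 0 d ++ pvSortedBucket 1 d ++ pvSortedBucket 2 d ++ pvSortedBucket 3 d ++ pvSortedBucket 4 d := by
  induction d using List.reverseRecOn with
  | nil => rfl
  | append_singleton d x ih =>
      rw [List.foldl_append, List.foldl_cons, List.foldl_nil, ih]
      simp only [List.append_assoc]
      rcases pvCat5_cases x with hc | hc | hc | hc | hc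
      · rw [insertBy_append_all_true _ _ _ _ (by
          intro y hy
          rcases List.mem_append.mp hy with h1 | hy2
          · exact cmp_true_bucket x 1 d (by omega) y h1
          rcases List.mem_append.mp hy2 with h2 | hy3
          · exact cmp_true_bucket x 2 d (by omega) y h2
          rcases List.mem_append.mp hy3 with h3 | h4
          · exact cmp_true_bucket x 3 d (by omega) y h3
          · exact cmp_true_bucket x 4 d (by omega) y h4)]
        rw [insertBy_bucket x 0 d hc,
          pvSortedBucket_snoc_eq 0 d x hc,
          pvSortedBucket_snoc_ne 1 d x (by omega), pvSortedBucket_snoc_ne 2 d x (by omega),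
          pvSortedBucket_snoc_ne 3 d x (by omega), pvSortedBucket_snoc_ne 4 d x (by omega)]
      · rw [insertBy_append_all_false _ _ _ _ (cmp_false_bucket x 0 d (by omega))]
        rw [insertBy_append_all_true _ _ _ _ (by
          intro y hy
          rcases List.mem_append.mp hy with h2 | hy3
          · exact cmp_true_bucket x 2 d (by omega) y h2
          rcases List.mem_append.mp hy3 with h3 | h4
          · exact cmp_true_bucket x 3 d (by omega) y h3
          · exact cmp_true_bucket x 4 d (by omega) y h4)]
        rw [insertBy_bucket x 1 d hc,
          pvSortedBucket_snoc_eq 1 d x hc,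
          pvSortedBucket_snoc_ne 0 d x (by omega), pvSortedBucket_snoc_ne 2 d x (by omega),
          pvSortedBucket_snoc_ne 3 d x (by omega), pvSortedBucket_snoc_ne 4 d x (by omega)]
      · rw [insertBy_append_all_false _ _ _ _ (cmp_false_bucket x 0 d (by omega)),
          insertBy_append_all_false _ _ _ _ (cmp_false_bucket x 1 d (by omega))]
        rw [insertBy_append_all_true _ _ _ _ (by
          intro y hy
          rcases List.mem_append.mp hy with h3 | h4
          · exact cmp_true_bucket x 3 d (by omega) y h3
          · exact cmp_true_bucket x 4 d (by omega) y h4)]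
        rw [insertBy_bucket x 2 d hc,
          pvSortedBucket_snoc_eq 2 d x hc,
          pvSortedBucket_snoc_ne 0 d x (by omega), pvSortedBucket_snoc_ne 1 d x (by omega),
          pvSortedBucket_snoc_ne 3 d x (by omega), pvSortedBucket_snoc_ne 4 d x (by omega)]
      · rw [insertBy_append_all_false _ _ _ _ (cmp_false_bucket x 0 d (by omega)),
          insertBy_append_all_false _ _ _ _ (cmp_false_bucket x 1 d (by omega)),
          insertBy_append_all_false _ _ _ _ (cmp_false_bucket x 2 d (by omega))]
        rw [insertBy_append_all_true _ _ _ _ (cmp_true_bucket x 4 d (by omega))]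
        rw [insertBy_bucket x 3 d hc,
          pvSortedBucket_snoc_eq 3 d x hc,
          pvSortedBucket_snoc_ne 0 d x (by omega), pvSortedBucket_snoc_ne 1 d x (by omega),
          pvSortedBucket_snoc_ne 2 d x (by omega), pvSortedBucket_snoc_ne 4 d x (by omega)]
      · rw [insertBy_append_all_false _ _ _ _ (cmp_false_bucket x 0 d (by omega)),
          insertBy_append_all_false _ _ _ _ (cmp_false_bucket x 1 d (by omega)),
          insertBy_append_all_false _ _ _ _ (cmp_false_bucket x 2 d (by omega)),
          insertBy_append_all_false _ _ _ _ (cmp_false_bucket x 3 d (by omega))]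
        rw [insertBy_bucket x 4 d hc,
          pvSortedBucket_snoc_eq 4 d x hc,
          pvSortedBucket_snoc_ne 0 d x (by omega), pvSortedBucket_snoc_ne 1 d x (by omega),
          pvSortedBucket_snoc_ne 2 d x (by omega), pvSortedBucket_snoc_ne 3 d x (by omega)]

lemma survivors_fold (xs : List String) : ∀ (seen : PySem.Set String) (accA accB : List String),
    accB = accA.filter (fun t => !(pvPrevTokens.contains (PySem.Str.lower t))) →
    xs.foldl (fun st raw =>
        let target := PySem.Str.strip (if raw == "" then "" else raw)
        if target == "" || PySem.Set.contains st.1 target then st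
        else (PySem.Set.add st.1 target,
          if pvPrevTokens.contains (PySem.Str.lower target) then st.2 else st.2 ++ [target]))
      (seen, accB)
      = ((xs.foldl (fun st raw =>
            let target := PySem.Str.strip (if raw == "" then "" else raw)
            if target == "" || PySem.Set.contains st.1 target then st
            else (PySem.Set.add st.1 target, st.2 ++ [target])) (seen, accA)).1,
         (xs.foldl (fun st raw =>
            let target := PySem.Str.strip (if raw == "" then "" else raw)
            if target == "" || PySem.Set.contains st.1 target then st
            else (PySem.Set.add st.1 target, st.2 ++ [target])) (seen, accA)).2.filter
          (fun t => !(pvPrevTokens.contains (PySem.Str.lower t)))) := by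
  induction xs with
  | nil => intro seen accA accB h; simp [h]
  | cons hd tl ih =>
      intro seen accA accB h
      dsimp only [List.foldl_cons]
      generalize PySem.Str.strip (if hd == "" then "" else hd) = t
      by_cases hg : (t == "" || PySem.Set.contains seen t) = true
      · rw [if_pos hg, if_pos hg]
        exact ih _ _ _ h
      · rw [if_neg hg, if_neg hg]
        apply ih
        cases hp : pvPrevTokens.contains (PySem.Str.lower t) with
        | true =>
            have hp' : PySem.Str.lower t ∈ pvPrevTokens := by simpa using hp
            simp [h, List.filter_append, hp']
        | false =>
            have hp' : PySem.Str.lower t ∉ pvPrevTokens := by simpa using hp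
            simp [h, List.filter_append, hp']

lemma survivors_eq (targets : List String) :
    (pvSurvivors targets).2
      = (pvDedupA targets).2.filter (fun t => !(pvPrevTokens.contains (PySem.Str.lower t))) := by
  unfold pvSurvivors pvDedupA
  rw [survivors_fold targets PySem.Set.empty [] [] rfl]

lemma notPrev_of_cat {y : String} {i : Int} (h : pvCat5 y = i) (hi : i ≠ 4) :
    pvPrevTokens.contains (PySem.Str.lower y) = false := by
  simp only [pvCat5] at h
  split_ifs at h with hp
  · omega
  · simpa using hp

lemma cat_filter_eq (i : Int) (hi : i ≠ 4) (d : List String) :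
    (d.filter (fun t => !(pvPrevTokens.contains (PySem.Str.lower t)))).filter
        (fun t => pvCategory t == i)
      = pvBucket i d := by
  rw [List.filter_filter]
  apply List.filter_congr
  intro t _
  simp only [pvCat5]
  by_cases hp : PySem.Str.lower t ∈ pvPrevTokens
  · simp [hp]
    omega
  · simp [hp]

-- ===== VERDICT (by name: the statement is the Claim_ definition above) =====
theorem order_classifieds_pagination_targets_spec : Claim_equal_order_classifieds_pagination_targets := by
  intro targets _
  unfold Spec_order_classifieds_pagination_targets
  unfold order_classifieds_pagination_targets order_classifieds_pagination_targets_alt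
  rw [split_sort, survivors_eq]
  rw [cat_filter_eq 0 (by omega), cat_filter_eq 1 (by omega),
      cat_filter_eq 2 (by omega), cat_filter_eq 3 (by omega)]
  simp only [List.append_assoc, List.filter_append]
  have hself : ∀ i : Int, i ≠ 4 →
      (pvSortedBucket i (pvDedupA targets).2).filter
        (fun t => !(pvPrevTokens.contains (PySem.Str.lower t)))
        = pvSortedBucket i (pvDedupA targets).2 := by
    intro i hi
    apply List.filter_eq_self.mpr
    intro y hy
    have := notPrev_of_cat (mem_pvSortedBucket hy) hi
    simpa using this
  have hnil : (pvSortedBucket 4 (pvDedupA targets).2).filter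
      (fun t => !(pvPrevTokens.contains (PySem.Str.lower t))) = [] := by
    apply List.filter_eq_nil_iff.mpr
    intro y hy
    have h4 := mem_pvSortedBucket hy
    simp only [pvCat5] at h4
    split_ifs at h4 with hp
    · simpa using hp
    · simp only [pvCategory] at h4; split_ifs at h4 <;> omega
  rw [hself 0 (by omega), hself 1 (by omega), hself 2 (by omega), hself 3 (by omega), hnil,
    List.append_nil]
  simp [pvSortedBucket]
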